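-- pv_equiv track=rewrite | github.com/Wazard/grupoX-Final-Exam_Spotify | full/sim_users_v4.py | group_genre_to_macro
-- ===== SOURCE A (Python) =====
-- def _norm_genre(g: str) -> str:
--     return str(g or "").strip().lower()
--
-- def group_genre_to_macro(genre: str) -> str:
--     """
--     Same mapping idea you used in sim_user_genre_only_v2.py.
--     Keep it here so benchmarking is self-contained.
--     """
--     g = _norm_genre(genre)
--     if g == "":
--         return "unknown"
--
--     if "metal" in g or g in {"grindcore", "hardcore"}:
--         return "metal"
--
--     if g in {"classical", "opera", "piano", "new-age"}:
--         return "classical_like"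
--     if g in {"show-tunes", "disney"}:
--         return "soundtrack_show"
--
--     if "rock" in g or g in {"grunge", "emo", "punk", "ska", "goth", "guitar"} or "punk" in g:
--         return "rock"
--
--     if any(k in g for k in [
--         "techno", "house", "edm", "dub", "dubstep", "electro", "electronic", "trance",
--         "drum-and-bass", "breakbeat", "garage", "hardstyle", "club", "minimal-techno", "idm",
--         "deep-house", "detroit-techno", "chicago-house", "progressive-house", "trip-hop"
--     ]):
--         return "electronic_dance"
--
--     if g in {"hip-hop", "r-n-b", "soul", "funk"}:
--         return "hiphop_rnb_soul"
--
--     if g in {"jazz", "blues"}: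
--         return "jazz_blues"
--
--     if g in {"pop", "synth-pop", "power-pop", "indie-pop", "pop-film", "party", "happy", "sad", "sleep", "study"}:
--         return "pop_mood"
--
--     if g in {"country", "honky-tonk", "bluegrass", "folk", "singer-songwriter", "songwriter"}:
--         return "country_folk"
--
--     if g in {"latin", "latino", "reggaeton", "salsa", "samba", "brazil", "mpb", "forro", "pagode",
--              "sertanejo", "spanish", "romance"}:
--         return "latin_brazil"
--
--     if g in {"reggae", "dancehall"}:
--         return "reggae_dancehall"
--
--     if g in {"world-music", "turkish", "iranian", "indian", "malay", "german", "french", "swedish", "british",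
--              "cantopop", "mandopop"}:
--         return "world_regional"
--     if g in {"j-pop", "j-rock", "j-idol", "j-dance", "k-pop", "anime"}:
--         return "east_asia_pop"
--
--     if g in {"children", "kids", "comedy"}:
--         return "kids_comedy"
--
--     if g in {"disco"}:
--         return "disco"
--
--     if g in {"acoustic", "ambient", "chill"}:
--         return "acoustic_ambient"
--
--     return "other"
-- ===== SOURCE B (Python) =====
-- # Substring keywords in priority order, then a single hash-map lookup for exact names.
-- _SUB = [("metal", "metal"), ("rock", "rock"), ("punk", "rock"),
--         ("techno", "electronic_dance"), ("house", "electronic_dance"),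
--         ("edm", "electronic_dance"), ("dub", "electronic_dance"),
--         ("dubstep", "electronic_dance"), ("electro", "electronic_dance"),
--         ("electronic", "electronic_dance"), ("trance", "electronic_dance"),
--         ("drum-and-bass", "electronic_dance"), ("breakbeat", "electronic_dance"),
--         ("garage", "electronic_dance"), ("hardstyle", "electronic_dance"),
--         ("club", "electronic_dance"), ("minimal-techno", "electronic_dance"),
--         ("idm", "electronic_dance"), ("deep-house", "electronic_dance"),
--         ("detroit-techno", "electronic_dance"), ("chicago-house", "electronic_dance"),
--         ("progressive-house", "electronic_dance"), ("trip-hop", "electronic_dance")]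
--
-- _EXACT = {
--     "grindcore": "metal", "hardcore": "metal",
--     "classical": "classical_like", "opera": "classical_like",
--     "piano": "classical_like", "new-age": "classical_like",
--     "show-tunes": "soundtrack_show", "disney": "soundtrack_show",
--     "grunge": "rock", "emo": "rock", "punk": "rock", "ska": "rock",
--     "goth": "rock", "guitar": "rock",
--     "hip-hop": "hiphop_rnb_soul", "r-n-b": "hiphop_rnb_soul",
--     "soul": "hiphop_rnb_soul", "funk": "hiphop_rnb_soul",
--     "jazz": "jazz_blues", "blues": "jazz_blues",
--     "pop": "pop_mood", "synth-pop": "pop_mood", "power-pop": "pop_mood",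
--     "indie-pop": "pop_mood", "pop-film": "pop_mood", "party": "pop_mood",
--     "happy": "pop_mood", "sad": "pop_mood", "sleep": "pop_mood", "study": "pop_mood",
--     "country": "country_folk", "honky-tonk": "country_folk",
--     "bluegrass": "country_folk", "folk": "country_folk",
--     "singer-songwriter": "country_folk", "songwriter": "country_folk",
--     "latin": "latin_brazil", "latino": "latin_brazil", "reggaeton": "latin_brazil",
--     "salsa": "latin_brazil", "samba": "latin_brazil", "brazil": "latin_brazil",
--     "mpb": "latin_brazil", "forro": "latin_brazil", "pagode": "latin_brazil",
--     "sertanejo": "latin_brazil", "spanish": "latin_brazil", "romance": "latin_brazil",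
--     "reggae": "reggae_dancehall", "dancehall": "reggae_dancehall",
--     "world-music": "world_regional", "turkish": "world_regional",
--     "iranian": "world_regional", "indian": "world_regional",
--     "malay": "world_regional", "german": "world_regional",
--     "french": "world_regional", "swedish": "world_regional",
--     "british": "world_regional", "cantopop": "world_regional",
--     "mandopop": "world_regional",
--     "j-pop": "east_asia_pop", "j-rock": "east_asia_pop", "j-idol": "east_asia_pop",
--     "j-dance": "east_asia_pop", "k-pop": "east_asia_pop", "anime": "east_asia_pop",
--     "children": "kids_comedy", "kids": "kids_comedy", "comedy": "kids_comedy",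
--     "disco": "disco",
--     "acoustic": "acoustic_ambient", "ambient": "acoustic_ambient",
--     "chill": "acoustic_ambient",
-- }
--
-- def group_genre_to_macro(genre: str) -> str:
--     g = str(genre or "").strip().lower()
--     if not g:
--         return "unknown"
--     for kw, mac in _SUB:
--         if kw in g:
--             return mac
--     return _EXACT.get(g, "other")
-- ===== Notes on version B (the rewrite author's own statement) =====
-- stated objective: alternative
-- what changed: Replaces A's 16-branch if-cascade of interleaved substring tests and set memberships by a two-stage algorithm: a priority-ordered substring-keyword scan, then one hash-map lookup (genre -> macro) that subsumes all of A's exact-match sets at once, falling back to the map's default.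
import Mathlib
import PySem

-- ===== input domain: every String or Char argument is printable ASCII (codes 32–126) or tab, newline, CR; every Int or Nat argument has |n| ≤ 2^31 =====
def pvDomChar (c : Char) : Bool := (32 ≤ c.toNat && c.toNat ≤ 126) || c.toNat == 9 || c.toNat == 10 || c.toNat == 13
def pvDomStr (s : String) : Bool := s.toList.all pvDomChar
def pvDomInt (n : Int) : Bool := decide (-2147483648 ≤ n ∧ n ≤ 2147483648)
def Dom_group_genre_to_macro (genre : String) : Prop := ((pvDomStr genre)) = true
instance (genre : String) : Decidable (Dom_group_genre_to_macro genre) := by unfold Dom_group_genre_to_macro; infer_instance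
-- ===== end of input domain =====

-- B replaces A's if-cascade by a priority substring-keyword scan plus ONE dict lookup covering all exact names (alternative decomposition; same return values).

-- ===== PORT A =====
-- _norm_genre: str(g or "").strip().lower()
def pvNormGenreA (g : String) : String :=
  PySem.Str.lower (PySem.Str.strip (if g == "" then "" else g))

def group_genre_to_macro (genre : String) : String :=
  let g := pvNormGenreA genre
  if g == "" then "unknown"
  else if PySem.Str.isIn "metal" g || (["grindcore", "hardcore"]).contains g then "metal"
  else if (["classical", "opera", "piano", "new-age"]).contains g then "classical_like"
  else if (["show-tunes", "disney"]).contains g then "soundtrack_show"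
  else if PySem.Str.isIn "rock" g || (["grunge", "emo", "punk", "ska", "goth", "guitar"]).contains g || PySem.Str.isIn "punk" g then "rock"
  else if (["techno", "house", "edm", "dub", "dubstep", "electro", "electronic", "trance",
      "drum-and-bass", "breakbeat", "garage", "hardstyle", "club", "minimal-techno", "idm",
      "deep-house", "detroit-techno", "chicago-house", "progressive-house", "trip-hop"]).any
      (fun k => PySem.Str.isIn k g) then "electronic_dance"
  else if (["hip-hop", "r-n-b", "soul", "funk"]).contains g then "hiphop_rnb_soul"
  else if (["jazz", "blues"]).contains g then "jazz_blues"
  else if (["pop", "synth-pop", "power-pop", "indie-pop", "pop-film", "party", "happy", "sad", "sleep", "study"]).contains g then "pop_mood"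
  else if (["country", "honky-tonk", "bluegrass", "folk", "singer-songwriter", "songwriter"]).contains g then "country_folk"
  else if (["latin", "latino", "reggaeton", "salsa", "samba", "brazil", "mpb", "forro",
      "pagode", "sertanejo", "spanish", "romance"]).contains g then "latin_brazil"
  else if (["reggae", "dancehall"]).contains g then "reggae_dancehall"
  else if (["world-music", "turkish", "iranian", "indian", "malay", "german", "french", "swedish", "british",
      "cantopop", "mandopop"]).contains g then "world_regional"
  else if (["j-pop", "j-rock", "j-idol", "j-dance", "k-pop", "anime"]).contains g then "east_asia_pop"
  else if (["children", "kids", "comedy"]).contains g then "kids_comedy"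
  else if (["disco"]).contains g then "disco"
  else if (["acoustic", "ambient", "chill"]).contains g then "acoustic_ambient"
  else "other"

-- ===== PORT B =====
-- B's priority-ordered substring keywords (keyword, macro)
def pvSub : List (String × String) :=
  [("metal", "metal"),
   ("rock", "rock"),
   ("punk", "rock"),
   ("techno", "electronic_dance"),
   ("house", "electronic_dance"),
   ("edm", "electronic_dance"),
   ("dub", "electronic_dance"),
   ("dubstep", "electronic_dance"),
   ("electro", "electronic_dance"),
   ("electronic", "electronic_dance"),
   ("trance", "electronic_dance"),
   ("drum-and-bass", "electronic_dance"),
   ("breakbeat", "electronic_dance"),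
   ("garage", "electronic_dance"),
   ("hardstyle", "electronic_dance"),
   ("club", "electronic_dance"),
   ("minimal-techno", "electronic_dance"),
   ("idm", "electronic_dance"),
   ("deep-house", "electronic_dance"),
   ("detroit-techno", "electronic_dance"),
   ("chicago-house", "electronic_dance"),
   ("progressive-house", "electronic_dance"),
   ("trip-hop", "electronic_dance")]

-- B's exact-name dictionary (all of A's exact sets merged into one map)
def pvExact : PySem.Dict String String := PySem.Dict.ofList
  [("grindcore", "metal"),
   ("hardcore", "metal"),
   ("classical", "classical_like"),
   ("opera", "classical_like"),
   ("piano", "classical_like"),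
   ("new-age", "classical_like"),
   ("show-tunes", "soundtrack_show"),
   ("disney", "soundtrack_show"),
   ("grunge", "rock"),
   ("emo", "rock"),
   ("punk", "rock"),
   ("ska", "rock"),
   ("goth", "rock"),
   ("guitar", "rock"),
   ("hip-hop", "hiphop_rnb_soul"),
   ("r-n-b", "hiphop_rnb_soul"),
   ("soul", "hiphop_rnb_soul"),
   ("funk", "hiphop_rnb_soul"),
   ("jazz", "jazz_blues"),
   ("blues", "jazz_blues"),
   ("pop", "pop_mood"),
   ("synth-pop", "pop_mood"),
   ("power-pop", "pop_mood"),
   ("indie-pop", "pop_mood"),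
   ("pop-film", "pop_mood"),
   ("party", "pop_mood"),
   ("happy", "pop_mood"),
   ("sad", "pop_mood"),
   ("sleep", "pop_mood"),
   ("study", "pop_mood"),
   ("country", "country_folk"),
   ("honky-tonk", "country_folk"),
   ("bluegrass", "country_folk"),
   ("folk", "country_folk"),
   ("singer-songwriter", "country_folk"),
   ("songwriter", "country_folk"),
   ("latin", "latin_brazil"),
   ("latino", "latin_brazil"),
   ("reggaeton", "latin_brazil"),
   ("salsa", "latin_brazil"),
   ("samba", "latin_brazil"),
   ("brazil", "latin_brazil"),
   ("mpb", "latin_brazil"),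
   ("forro", "latin_brazil"),
   ("pagode", "latin_brazil"),
   ("sertanejo", "latin_brazil"),
   ("spanish", "latin_brazil"),
   ("romance", "latin_brazil"),
   ("reggae", "reggae_dancehall"),
   ("dancehall", "reggae_dancehall"),
   ("world-music", "world_regional"),
   ("turkish", "world_regional"),
   ("iranian", "world_regional"),
   ("indian", "world_regional"),
   ("malay", "world_regional"),
   ("german", "world_regional"),
   ("french", "world_regional"),
   ("swedish", "world_regional"),
   ("british", "world_regional"),
   ("cantopop", "world_regional"),
   ("mandopop", "world_regional"),
   ("j-pop", "east_asia_pop"),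
   ("j-rock", "east_asia_pop"),
   ("j-idol", "east_asia_pop"),
   ("j-dance", "east_asia_pop"),
   ("k-pop", "east_asia_pop"),
   ("anime", "east_asia_pop"),
   ("children", "kids_comedy"),
   ("kids", "kids_comedy"),
   ("comedy", "kids_comedy"),
   ("disco", "disco"),
   ("acoustic", "acoustic_ambient"),
   ("ambient", "acoustic_ambient"),
   ("chill", "acoustic_ambient")]

-- the 'for kw, mac in _SUB' loop: first keyword contained in g wins
def pvScanSub (rules : List (String × String)) (g : String) : Option String :=
  match rules with
  | [] => none
  | (kw, mac) :: rest => if PySem.Str.isIn kw g then some mac else pvScanSub rest g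

def group_genre_to_macro_alt (genre : String) : String :=
  let g := PySem.Str.lower (PySem.Str.strip (if genre == "" then "" else genre))
  if g == "" then "unknown"
  else
    match pvScanSub pvSub g with
    | some mac => mac
    | none => PySem.Dict.getD pvExact g "other"

-- ===== PRECONDITION & SPEC =====
def Spec_group_genre_to_macro (genre : String) (out : String) : Prop := out = group_genre_to_macro_alt genre
instance (genre : String) (out : String) : Decidable (Spec_group_genre_to_macro genre out) := by unfold Spec_group_genre_to_macro; infer_instance

-- ===== CLAIM (what is proved, stated in full; the proofs are below) =====
def Claim_equal_group_genre_to_macro : Prop := ∀ (genre : String), Dom_group_genre_to_macro genre → Spec_group_genre_to_macro genre (group_genre_to_macro genre)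

-- ===== LEMMAS AND PROOFS =====

-- all exact-name keys of pvExact, for the case split of the main proof
def pvAllKeys : List String :=
  ["grindcore",
   "hardcore",
   "classical",
   "opera",
   "piano",
   "new-age",
   "show-tunes",
   "disney",
   "grunge",
   "emo",
   "punk",
   "ska",
   "goth",
   "guitar",
   "hip-hop",
   "r-n-b",
   "soul",
   "funk",
   "jazz",
   "blues",
   "pop",
   "synth-pop",
   "power-pop",
   "indie-pop",
   "pop-film",
   "party",
   "happy",
   "sad",
   "sleep",
   "study",
   "country",
   "honky-tonk",
   "bluegrass",
   "folk",
   "singer-songwriter",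
   "songwriter",
   "latin",
   "latino",
   "reggaeton",
   "salsa",
   "samba",
   "brazil",
   "mpb",
   "forro",
   "pagode",
   "sertanejo",
   "spanish",
   "romance",
   "reggae",
   "dancehall",
   "world-music",
   "turkish",
   "iranian",
   "indian",
   "malay",
   "german",
   "french",
   "swedish",
   "british",
   "cantopop",
   "mandopop",
   "j-pop",
   "j-rock",
   "j-idol",
   "j-dance",
   "k-pop",
   "anime",
   "children",
   "kids",
   "comedy",
   "disco",
   "acoustic",
   "ambient",
   "chill"]

theorem pv_scan_cons_true {kw mac g : String} {rest : List (String × String)}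
    (h : PySem.Str.isIn kw g = true) :
    pvScanSub ((kw, mac) :: rest) g = some mac := by
  simp only [pvScanSub]
  rw [h]
  simp

theorem pv_scan_cons_false {kw mac g : String} {rest : List (String × String)}
    (h : PySem.Str.isIn kw g = false) :
    pvScanSub ((kw, mac) :: rest) g = pvScanSub rest g := by
  simp only [pvScanSub]
  rw [h]
  simp

-- a run of keywords that all map to the same macro behaves like `any`
theorem pv_scan_tail (ks : List String) (g mac d : String) :
    (match pvScanSub (ks.map (fun k => (k, mac))) g with
     | some m => m
     | none => d)
    = if ks.any (fun k => PySem.Str.isIn k g) then mac else d := by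
  induction ks with
  | nil => simp [pvScanSub]
  | cons k ks ih =>
      simp only [List.map_cons, List.any_cons]
      by_cases h : PySem.Str.isIn k g = true
      · rw [pv_scan_cons_true h]; simp only [h]; simp
      · have h' : PySem.Str.isIn k g = false := Bool.not_eq_true _ ▸ (Bool.eq_false_iff.mpr (fun hh => h hh))
        rw [pv_scan_cons_false h', ih]; simp only [h']; simp

set_option maxRecDepth 4000 in
theorem pv_core_eq (g : String) :
    (if g == "" then "unknown"
     else
       match pvScanSub pvSub g with
       | some mac => mac
       | none => PySem.Dict.getD pvExact g "other")
    = (if g == "" then "unknown"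
       else if PySem.Str.isIn "metal" g || (["grindcore", "hardcore"]).contains g then "metal"
       else if (["classical", "opera", "piano", "new-age"]).contains g then "classical_like"
       else if (["show-tunes", "disney"]).contains g then "soundtrack_show"
       else if PySem.Str.isIn "rock" g || (["grunge", "emo", "punk", "ska", "goth", "guitar"]).contains g || PySem.Str.isIn "punk" g then "rock"
       else if (["techno", "house", "edm", "dub", "dubstep", "electro", "electronic", "trance",
           "drum-and-bass", "breakbeat", "garage", "hardstyle", "club", "minimal-techno", "idm",
           "deep-house", "detroit-techno", "chicago-house", "progressive-house", "trip-hop"]).any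
           (fun k => PySem.Str.isIn k g) then "electronic_dance"
       else if (["hip-hop", "r-n-b", "soul", "funk"]).contains g then "hiphop_rnb_soul"
       else if (["jazz", "blues"]).contains g then "jazz_blues"
       else if (["pop", "synth-pop", "power-pop", "indie-pop", "pop-film", "party", "happy", "sad", "sleep", "study"]).contains g then "pop_mood"
       else if (["country", "honky-tonk", "bluegrass", "folk", "singer-songwriter", "songwriter"]).contains g then "country_folk"
       else if (["latin", "latino", "reggaeton", "salsa", "samba", "brazil", "mpb", "forro",
           "pagode", "sertanejo", "spanish", "romance"]).contains g then "latin_brazil"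
       else if (["reggae", "dancehall"]).contains g then "reggae_dancehall"
       else if (["world-music", "turkish", "iranian", "indian", "malay", "german", "french", "swedish", "british",
           "cantopop", "mandopop"]).contains g then "world_regional"
       else if (["j-pop", "j-rock", "j-idol", "j-dance", "k-pop", "anime"]).contains g then "east_asia_pop"
       else if (["children", "kids", "comedy"]).contains g then "kids_comedy"
       else if (["disco"]).contains g then "disco"
       else if (["acoustic", "ambient", "chill"]).contains g then "acoustic_ambient"
       else "other") := by
  by_cases hg : g = ""
  · simp [hg]
  · by_cases hk : g ∈ pvAllKeys
    · unfold pvAllKeys at hk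
      fin_cases hk <;> decide
    · unfold pvAllKeys at hk
      simp only [List.mem_cons, List.not_mem_nil, or_false, not_or] at hk
      have hkeys : pvExact.keys = pvAllKeys := by decide
      have hd : PySem.Dict.getD pvExact g "other" = "other" := by
        apply PySem.Dict.getD_of_not_contains
        rw [PySem.Dict.contains_eq_decide_mem_keys, hkeys]
        simp [pvAllKeys, hk]
      simp only [pvSub]
      cases hm : PySem.Str.isIn "metal" g with
      | true =>
          rw [pv_scan_cons_true hm]
          simp [hg]
      | false =>
        rw [pv_scan_cons_false hm]
        cases hr : PySem.Str.isIn "rock" g with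
        | true =>
            rw [pv_scan_cons_true hr]
            simp [hg, hk]
        | false =>
          rw [pv_scan_cons_false hr]
          cases hp : PySem.Str.isIn "punk" g with
          | true =>
              rw [pv_scan_cons_true hp]
              simp [hg, hk]
          | false =>
            rw [pv_scan_cons_false hp]
            rw [show ([("techno", "electronic_dance"), ("house", "electronic_dance"), ("edm", "electronic_dance"), ("dub", "electronic_dance"), ("dubstep", "electronic_dance"), ("electro", "electronic_dance"), ("electronic", "electronic_dance"), ("trance", "electronic_dance"), ("drum-and-bass", "electronic_dance"), ("breakbeat", "electronic_dance"), ("garage", "electronic_dance"), ("hardstyle", "electronic_dance"), ("club", "electronic_dance"), ("minimal-techno", "electronic_dance"), ("idm", "electronic_dance"), ("deep-house", "electronic_dance"), ("detroit-techno", "electronic_dance"), ("chicago-house", "electronic_dance"), ("progressive-house", "electronic_dance"), ("trip-hop", "electronic_dance")] : List (String × String))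
                  = (["techno", "house", "edm", "dub", "dubstep", "electro", "electronic", "trance", "drum-and-bass", "breakbeat", "garage", "hardstyle", "club", "minimal-techno", "idm", "deep-house", "detroit-techno", "chicago-house", "progressive-house", "trip-hop"] : List String).map (fun k => (k, "electronic_dance")) from rfl]
            rw [pv_scan_tail, hd]
            simp [hg, hk]

-- ===== VERDICT (by name: the statement is the Claim_ definition above) =====
theorem group_genre_to_macro_spec : Claim_equal_group_genre_to_macro := by
  intro genre _
  unfold Spec_group_genre_to_macro
  simp only [group_genre_to_macro, group_genre_to_macro_alt, pvNormGenreA]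
  exact (pv_core_eq (PySem.Str.lower (PySem.Str.strip (if genre == "" then "" else genre)))).symm
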